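-- pv_equiv track=rewrite | github.com/zorkian/advent-of-code | 2023/day13.py | findSplitx
-- ===== SOURCE A (Python) =====
-- def findSplitx(nums):
--     lst = []
--     for idx in range(len(nums)):
--         # if we're matching, our most recent number, walk back and see
--         # if it matches
--         # log(lst, nums[idx])
--         if len(lst) == 0:
--             lst.append(nums[idx])
--             continue
--
--         # see if here forward matches there backwards
--         if lst[-1] == nums[idx]:
--             matches = True
--             rlst = list(reversed(lst))
--             for i in range(len(rlst)):
--                 if idx + i < len(nums):
--                     if rlst[i] != nums[idx + i]:
--                         matches = False
--             if matches:
--                 return idx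
--
--         lst.append(nums[idx])
-- ===== SOURCE B (Python) =====
-- def findSplitx(nums):
--     # Global sieve: every mismatched index pair (a, b) with a+b odd rules out the
--     # split centered between them; the answer is the first split nobody ruled out.
--     n = len(nums)
--     bad = [False] * n
--     for a in range(n):
--         for b in range(a + 1, n):
--             if (a + b) % 2 == 1 and nums[a] != nums[b]:
--                 bad[(a + b + 1) // 2] = True
--     for c in range(1, n):
--         if not bad[c]:
--             return c
--     return None
-- ===== Notes on version B (the rewrite author's own statement) =====
-- stated objective: alternative
-- what changed: A brute-forces each split point, comparing the reversed prefix against the suffix with a flag loop; B instead runs a global sieve over all index pairs (a,b) with a+b odd, marking the center (a+b+1)//2 bad on any mismatch, and then returns the first unmarked split -- no per-split comparison loop remains.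
import Mathlib
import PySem

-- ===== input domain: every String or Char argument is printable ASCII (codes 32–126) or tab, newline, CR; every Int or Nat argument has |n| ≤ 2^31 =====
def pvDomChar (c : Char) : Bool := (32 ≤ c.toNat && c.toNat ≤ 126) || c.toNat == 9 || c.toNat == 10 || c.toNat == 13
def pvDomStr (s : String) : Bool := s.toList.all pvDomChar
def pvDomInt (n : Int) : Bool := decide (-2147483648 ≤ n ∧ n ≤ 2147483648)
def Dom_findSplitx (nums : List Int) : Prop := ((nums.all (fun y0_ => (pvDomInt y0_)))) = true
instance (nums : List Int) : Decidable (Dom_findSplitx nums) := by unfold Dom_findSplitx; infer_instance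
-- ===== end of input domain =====

-- B replaces A's per-split reversed-prefix-vs-suffix comparison by a pair sieve:
-- every mismatched pair marks its center bad, then the first unmarked split is returned
-- (objective: alternative; same asymptotic cost).

-- ===== PORT A =====
-- inner loop: matches = True; for i in range(len(rlst)): if idx+i < len(nums): if rlst[i] != nums[idx+i]: matches = False
-- (indices i and idx+i are guarded in range, so pyGetD with default 0 is exact)
def findSplitxMatches (nums rlst : List Int) (idx : Int) : Bool :=
  (PySem.List.pyRange 0 rlst.length 1).foldl
    (fun m i =>
      if idx + i < (nums.length : Int) then
        if PySem.List.pyGetD rlst i 0 ≠ PySem.List.pyGetD nums (idx + i) 0 then false else m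
      else m)
    true

-- the 'for idx in range(len(nums))' loop with accumulator lst and early return
def findSplitxLoop (nums : List Int) (idxs : List Int) (lst : List Int) : Option Int :=
  match idxs with
  | [] => none
  | idx :: rest =>
    if lst.length = 0 then
      findSplitxLoop nums rest (lst ++ [PySem.List.pyGetD nums idx 0])
    else if PySem.List.pyGetD lst (-1) 0 = PySem.List.pyGetD nums idx 0 then
      if findSplitxMatches nums lst.reverse idx then some idx
      else findSplitxLoop nums rest (lst ++ [PySem.List.pyGetD nums idx 0])
    else
      findSplitxLoop nums rest (lst ++ [PySem.List.pyGetD nums idx 0])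

def findSplitx (nums : List Int) : Option Int :=
  findSplitxLoop nums (PySem.List.pyRange 0 nums.length 1) []

-- ===== PORT B =====
-- bad = [False]*n; for a in range(n): for b in range(a+1, n):
--   if (a+b) % 2 == 1 and nums[a] != nums[b]: bad[(a+b+1)//2] = True
-- for c in range(1, n): if not bad[c]: return c
-- (all indices used are in range, so pyGetD/pySetD are exact)
def findSplitx_alt (nums : List Int) : Option Int :=
  let n : Int := nums.length
  let bad : List Bool :=
    (PySem.List.pyRange 0 n 1).foldl
      (fun arr a =>
        (PySem.List.pyRange (a + 1) n 1).foldl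
          (fun arr b =>
            if PySem.Int.mod (a + b) 2 = 1 ∧ PySem.List.pyGetD nums a 0 ≠ PySem.List.pyGetD nums b 0 then
              PySem.List.pySetD arr (PySem.Int.floordiv (a + b + 1) 2) true
            else arr)
          arr)
      (List.replicate nums.length false)
  (PySem.List.pyRange 1 n 1).find? (fun c => !(PySem.List.pyGetD bad c false))

-- ===== PRECONDITION & SPEC =====
def Spec_findSplitx (nums : List Int) (out : Option Int) : Prop := out = findSplitx_alt nums
instance (nums : List Int) (out : Option Int) : Decidable (Spec_findSplitx nums out) := by unfold Spec_findSplitx; infer_instance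

-- ===== CLAIM (what is proved, stated in full; the proofs are below) =====
def Claim_equal_findSplitx : Prop := ∀ (nums : List Int), Dom_findSplitx nums → Spec_findSplitx nums (findSplitx nums)

-- ===== LEMMAS AND PROOFS =====

-- canonical mirror condition around split j, phrased with getD (all accesses in range)
abbrev MirrorAt (nums : List Int) (j : Nat) : Prop :=
  ∀ i : Nat, i < j → j + i < nums.length → nums.getD (j - 1 - i) 0 = nums.getD (j + i) 0

-- the inner flag loop of A returns true iff every guarded pair matches
lemma flagAux (nums rlst : List Int) (idx : Int) (l : List Int) (b : Bool) :
    (l.foldl (fun m i =>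
      if idx + i < (nums.length : Int) then
        if PySem.List.pyGetD rlst i 0 ≠ PySem.List.pyGetD nums (idx + i) 0 then false else m
      else m) b) = true
    ↔ b = true ∧ ∀ i ∈ l, idx + i < (nums.length : Int) →
        PySem.List.pyGetD rlst i 0 = PySem.List.pyGetD nums (idx + i) 0 := by
  induction l generalizing b with
  | nil => simp
  | cons x xs ih =>
    by_cases hp : idx + x < (nums.length : Int)
    · by_cases hq : PySem.List.pyGetD rlst x 0 = PySem.List.pyGetD nums (idx + x) 0
      · rw [List.foldl_cons, if_pos hp, if_neg (not_not_intro hq), ih]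
        constructor
        · rintro ⟨hb, h⟩
          refine ⟨hb, fun i hi hlt => ?_⟩
          rcases List.mem_cons.mp hi with rfl | hi
          · exact hq
          · exact h i hi hlt
        · rintro ⟨hb, h⟩
          exact ⟨hb, fun i hi hlt => h i (List.mem_cons_of_mem _ hi) hlt⟩
      · rw [List.foldl_cons, if_pos hp, if_pos hq, ih]
        constructor
        · rintro ⟨hb, _⟩; simp at hb
        · rintro ⟨_, h⟩
          exact absurd (h x (by simp) hp) hq
    · rw [List.foldl_cons, if_neg hp, ih]
      constructor
      · rintro ⟨hb, h⟩
        refine ⟨hb, fun i hi hlt => ?_⟩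
        rcases List.mem_cons.mp hi with rfl | hi
        · exact absurd hlt hp
        · exact h i hi hlt
      · rintro ⟨hb, h⟩
        exact ⟨hb, fun i hi hlt => h i (List.mem_cons_of_mem _ hi) hlt⟩

-- A's guard-plus-flag test equals MirrorAt
lemma condA_iff (nums : List Int) (j : Nat) (hj1 : 1 ≤ j) (hj2 : j < nums.length) :
    ((PySem.List.pyGetD (nums.take j) (-1) 0 = PySem.List.pyGetD nums (j : Int) 0) ∧
     findSplitxMatches nums (nums.take j).reverse (j : Int) = true)
    ↔ MirrorAt nums j := by
  have hlen : (nums.take j).length = j := by simp; omega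
  have hrlen : ((nums.take j).reverse).length = j := by simp; omega
  have hgetr : ∀ i : Nat, i < j →
      PySem.List.pyGetD ((nums.take j).reverse) (i : Int) 0 = nums.getD (j - 1 - i) 0 := by
    intro i hi
    rw [PySem.List.pyGetD_natCast]
    have h1 : i < ((nums.take j).reverse).length := by omega
    rw [List.getD_eq_getElem _ _ h1, List.getElem_reverse,
        List.getElem_take, List.getD_eq_getElem _ _ (by simp at h1 ⊢; omega)]
    congr 1; omega
  have hmatch : findSplitxMatches nums (nums.take j).reverse (j : Int) = true ↔ MirrorAt nums j := by
    unfold findSplitxMatches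
    rw [flagAux]
    simp only [true_and]
    constructor
    · intro h i hi hlt
      have := h (i : Int) (by rw [PySem.List.mem_pyRange_one]; constructor <;> [positivity; (rw [hrlen]; exact_mod_cast hi)])
        (by omega)
      rw [hgetr i hi] at this
      rw [this]
      have : ((j : Int) + i) = ((j + i : Nat) : Int) := by push_cast; ring
      rw [this, PySem.List.pyGetD_natCast]
    · intro h i hi hlt
      rw [PySem.List.mem_pyRange_one, hrlen] at hi
      obtain ⟨hi0, hij⟩ := hi
      have hieq : i = ((i.toNat : Nat) : Int) := by omega
      have hij' : i.toNat < j := by omega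
      have hlt' : j + i.toNat < nums.length := by omega
      rw [hieq, hgetr i.toNat hij']
      rw [h i.toNat hij' hlt']
      have : ((j : Int) + (i.toNat : Nat)) = ((j + i.toNat : Nat) : Int) := by push_cast; ring
      rw [this, PySem.List.pyGetD_natCast]
  constructor
  · rintro ⟨_, hm⟩; exact hmatch.mp hm
  · intro h
    refine ⟨?_, hmatch.mpr h⟩
    have hne : nums.take j ≠ [] := by
      intro he; rw [he] at hlen; simp at hlen; omega
    rw [PySem.List.pyGetD_neg_one _ _ hne, List.getLast_eq_getElem, PySem.List.pyGetD_natCast,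
        List.getElem_take, List.getD_eq_getElem _ _ hj2]
    have h0 := h 0 (by omega) (by omega)
    simp only [Nat.add_zero] at h0
    rw [List.getD_eq_getElem _ _ (by omega), List.getD_eq_getElem _ _ (by omega)] at h0
    simp only [hlen]
    convert h0 using 2

-- appending the next element extends the prefix
lemma take_step (nums : List Int) (j : Nat) (hj : j < nums.length) :
    nums.take j ++ [PySem.List.pyGetD nums (j : Int) 0] = nums.take (j + 1) := by
  rw [PySem.List.pyGetD_natCast, List.take_add_one, List.getD_eq_getElem _ _ hj]
  simp [List.getElem?_eq_getElem hj]

-- A's loop computes the first split index with MirrorAt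
lemma loopA_find (nums : List Int) : ∀ (m j : Nat), nums.length - j = m → 1 ≤ j →
    findSplitxLoop nums (PySem.List.pyRange (j : Int) (nums.length : Int) 1) (nums.take j)
    = (PySem.List.pyRange (j : Int) (nums.length : Int) 1).find?
        (fun c => decide (MirrorAt nums c.toNat)) := by
  intro m
  induction m with
  | zero =>
    intro j hm _
    rw [PySem.List.pyRange_one_eq_nil (by exact_mod_cast Nat.le_of_sub_eq_zero hm)]
    rfl
  | succ m ih =>
    intro j hm hj
    have hjn : j < nums.length := by omega
    rw [PySem.List.pyRange_one_cons (by exact_mod_cast hjn)]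
    rw [findSplitxLoop, List.find?_cons]
    have hlen : (nums.take j).length = j := by simp; omega
    have hne0 : ¬ ((nums.take j).length = 0) := by omega
    simp only [hne0, if_false]
    have htn : ((j : Int)).toNat = j := by omega
    have hrec : findSplitxLoop nums (PySem.List.pyRange ((j : Int) + 1) (nums.length : Int) 1)
          (nums.take j ++ [PySem.List.pyGetD nums (j : Int) 0])
        = (PySem.List.pyRange ((j : Int) + 1) (nums.length : Int) 1).find?
            (fun c => decide (MirrorAt nums c.toNat)) := by
      rw [take_step nums j hjn]
      have hc : ((j : Int) + 1) = ((j + 1 : Nat) : Int) := by push_cast; ring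
      rw [hc]
      exact ih (j + 1) (by omega) (by omega)
    by_cases hB : MirrorAt nums j
    · have hA := (condA_iff nums j hj hjn).mpr hB
      rw [if_pos hA.1, if_pos hA.2]
      have hd : decide (MirrorAt nums ((j : Int)).toNat) = true := by
        rw [htn]; exact decide_eq_true hB
      rw [hd]
    · have hd : decide (MirrorAt nums ((j : Int)).toNat) = false := by
        rw [htn]; exact decide_eq_false hB
      rw [hd]
      by_cases hG : PySem.List.pyGetD (nums.take j) (-1) 0 = PySem.List.pyGetD nums (j : Int) 0
      · rw [if_pos hG]
        have hM : ¬ (findSplitxMatches nums (nums.take j).reverse (j : Int) = true) := by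
          intro hm'; exact hB ((condA_iff nums j hj hjn).mp ⟨hG, hm'⟩)
        rw [if_neg hM]
        exact hrec
      · rw [if_neg hG]
        exact hrec

lemma A_eq_find (nums : List Int) :
    findSplitx nums
    = (PySem.List.pyRange 1 (nums.length : Int) 1).find?
        (fun c => decide (MirrorAt nums c.toNat)) := by
  unfold findSplitx
  rcases nums with _ | ⟨x, xs⟩
  · rfl
  · set nums := x :: xs with hnums
    have hn : 0 < nums.length := by simp [hnums]
    rw [PySem.List.pyRange_one_cons (by exact_mod_cast hn)]
    rw [findSplitxLoop]
    rw [if_pos (by simp)]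
    simp only [List.nil_append]
    have h1 : [PySem.List.pyGetD nums (0 : Int) 0] = nums.take 1 := by
      have := take_step nums 0 hn
      simpa using this
    rw [h1]
    have hc : ((0 : Int) + 1) = ((1 : Nat) : Int) := by norm_num
    rw [hc]
    exact loopA_find nums (nums.length - 1) 1 rfl le_rfl

-- the Nat-level "some mismatched pair has center c" condition of B's sieve
def BadC (nums : List Int) (c : Nat) : Prop :=
  ∃ A B : Nat, A < B ∧ B < nums.length ∧ (A + B) % 2 = 1 ∧
    nums.getD A 0 ≠ nums.getD B 0 ∧ (A + B + 1) / 2 = c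

-- one conditional set: effect on a getD read
lemma getD_pySetD_true (arr : List Bool) (i : Int) (c : Nat) (h0 : 0 ≤ i)
    (hlt : i < (arr.length : Int)) :
    PySem.List.pyGetD (PySem.List.pySetD arr i true) (c : Int) false
    = ((i == (c : Int)) || PySem.List.pyGetD arr (c : Int) false) := by
  rw [PySem.List.pySetD_of_nonneg _ _ h0, PySem.List.pyGetD_natCast, PySem.List.pyGetD_natCast]
  by_cases hc : i = (c : Int)
  · have hcl : c < arr.length := by omega
    subst hc
    have h1 : c < (arr.set ((c : Int)).toNat true).length := by simpa using hcl
    rw [List.getD_eq_getElem _ _ h1]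
    simp
  · have hbe : (i == (c : Int)) = false := by simpa using hc
    have hne : i.toNat ≠ c := by omega
    rw [hbe, Bool.false_or]
    rcases Nat.lt_or_ge c arr.length with hcl | hcl
    · rw [List.getD_eq_getElem _ _ (by simpa using hcl), List.getD_eq_getElem _ _ hcl]
      simp [hne]
    · rw [List.getD_eq_default _ _ (by simpa using hcl), List.getD_eq_default _ _ hcl]

-- inner fold characterization
lemma inner_getD (nums : List Int) (a : Int) (c : Nat) :
    ∀ (bs : List Int) (arr : List Bool), arr.length = nums.length →
    (∀ b ∈ bs, a < b ∧ b < (nums.length : Int)) → 0 ≤ a →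
    ((bs.foldl
        (fun arr b =>
          if PySem.Int.mod (a + b) 2 = 1 ∧ PySem.List.pyGetD nums a 0 ≠ PySem.List.pyGetD nums b 0 then
            PySem.List.pySetD arr (PySem.Int.floordiv (a + b + 1) 2) true
          else arr) arr).length = nums.length)
    ∧ (PySem.List.pyGetD
        (bs.foldl
          (fun arr b =>
            if PySem.Int.mod (a + b) 2 = 1 ∧ PySem.List.pyGetD nums a 0 ≠ PySem.List.pyGetD nums b 0 then
              PySem.List.pySetD arr (PySem.Int.floordiv (a + b + 1) 2) true
            else arr) arr) (c : Int) false
      = (PySem.List.pyGetD arr (c : Int) false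
         || bs.any (fun b => decide (PySem.Int.mod (a + b) 2 = 1
              ∧ PySem.List.pyGetD nums a 0 ≠ PySem.List.pyGetD nums b 0
              ∧ PySem.Int.floordiv (a + b + 1) 2 = (c : Int))))) := by
  intro bs
  induction bs with
  | nil => intro arr hlen _ _; exact ⟨hlen, by simp⟩
  | cons b rest ih =>
    intro arr hlen hbs ha
    have hb := hbs b (by simp)
    by_cases hcond : PySem.Int.mod (a + b) 2 = 1 ∧ PySem.List.pyGetD nums a 0 ≠ PySem.List.pyGetD nums b 0
    · have hidx0 : (0 : Int) ≤ PySem.Int.floordiv (a + b + 1) 2 := by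
        rw [PySem.Int.floordiv_eq_ediv_of_pos (by norm_num)]; omega
      have hidx1 : PySem.Int.floordiv (a + b + 1) 2 < (arr.length : Int) := by
        rw [PySem.Int.floordiv_eq_ediv_of_pos (by norm_num), hlen]; omega
      have hlen' : (PySem.List.pySetD arr (PySem.Int.floordiv (a + b + 1) 2) true).length = nums.length := by
        rw [PySem.List.length_pySetD]; exact hlen
      obtain ⟨ihl, ihg⟩ := ih (PySem.List.pySetD arr (PySem.Int.floordiv (a + b + 1) 2) true) hlen'
        (fun b' hb' => hbs b' (by simp [hb'])) ha
      refine ⟨by simp only [List.foldl_cons]; rw [if_pos hcond]; exact ihl, ?_⟩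
      simp only [List.foldl_cons]
      rw [if_pos hcond]
      rw [ihg, getD_pySetD_true arr _ c hidx0 hidx1]
      simp only [List.any_cons]
      by_cases hc : PySem.Int.floordiv (a + b + 1) 2 = (c : Int)
      · have hbeq : (PySem.Int.floordiv (a + b + 1) 2 == (c : Int)) = true := by
          simpa using hc
        have hdec : decide (PySem.Int.mod (a + b) 2 = 1
            ∧ PySem.List.pyGetD nums a 0 ≠ PySem.List.pyGetD nums b 0
            ∧ PySem.Int.floordiv (a + b + 1) 2 = (c : Int)) = true := by
          rw [decide_eq_true_iff]; exact ⟨hcond.1, hcond.2, hc⟩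
        rw [hbeq, hdec]
        simp
      · have hbeq : (PySem.Int.floordiv (a + b + 1) 2 == (c : Int)) = false := by
          simpa using hc
        have hdec : decide (PySem.Int.mod (a + b) 2 = 1
            ∧ PySem.List.pyGetD nums a 0 ≠ PySem.List.pyGetD nums b 0
            ∧ PySem.Int.floordiv (a + b + 1) 2 = (c : Int)) = false := by
          apply decide_eq_false; rintro ⟨_, _, h3⟩; exact hc h3
        rw [hbeq, hdec]
        simp
    · obtain ⟨ihl, ihg⟩ := ih arr hlen (fun b' hb' => hbs b' (by simp [hb'])) ha
      refine ⟨by simp only [List.foldl_cons]; rw [if_neg hcond]; exact ihl, ?_⟩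
      simp only [List.foldl_cons]
      rw [if_neg hcond, ihg]
      simp only [List.any_cons]
      have hdec : decide (PySem.Int.mod (a + b) 2 = 1
          ∧ PySem.List.pyGetD nums a 0 ≠ PySem.List.pyGetD nums b 0
          ∧ PySem.Int.floordiv (a + b + 1) 2 = (c : Int)) = false := by
        apply decide_eq_false; rintro ⟨h1, h2, _⟩; exact hcond ⟨h1, h2⟩
      rw [hdec]
      simp

-- outer fold characterization
lemma outer_getD (nums : List Int) (c : Nat) :
    ∀ (as_ : List Int) (arr : List Bool), arr.length = nums.length →
    (∀ a ∈ as_, 0 ≤ a) →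
    ((as_.foldl
        (fun arr a =>
          (PySem.List.pyRange (a + 1) (nums.length : Int) 1).foldl
            (fun arr b =>
              if PySem.Int.mod (a + b) 2 = 1 ∧ PySem.List.pyGetD nums a 0 ≠ PySem.List.pyGetD nums b 0 then
                PySem.List.pySetD arr (PySem.Int.floordiv (a + b + 1) 2) true
              else arr) arr) arr).length = nums.length)
    ∧ (PySem.List.pyGetD
        (as_.foldl
          (fun arr a =>
            (PySem.List.pyRange (a + 1) (nums.length : Int) 1).foldl
              (fun arr b =>
                if PySem.Int.mod (a + b) 2 = 1 ∧ PySem.List.pyGetD nums a 0 ≠ PySem.List.pyGetD nums b 0 then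
                  PySem.List.pySetD arr (PySem.Int.floordiv (a + b + 1) 2) true
                else arr) arr) arr) (c : Int) false
      = (PySem.List.pyGetD arr (c : Int) false
         || as_.any (fun a =>
              (PySem.List.pyRange (a + 1) (nums.length : Int) 1).any
                (fun b => decide (PySem.Int.mod (a + b) 2 = 1
                  ∧ PySem.List.pyGetD nums a 0 ≠ PySem.List.pyGetD nums b 0
                  ∧ PySem.Int.floordiv (a + b + 1) 2 = (c : Int)))))) := by
  intro as_
  induction as_ with
  | nil => intro arr hlen _; exact ⟨hlen, by simp⟩
  | cons a rest ih =>
    intro arr hlen has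
    have ha := has a (by simp)
    have hbs : ∀ b ∈ PySem.List.pyRange (a + 1) (nums.length : Int) 1,
        a < b ∧ b < (nums.length : Int) := by
      intro b hb
      rw [PySem.List.mem_pyRange_one] at hb
      omega
    obtain ⟨il, ig⟩ := inner_getD nums a c (PySem.List.pyRange (a + 1) (nums.length : Int) 1) arr hlen hbs ha
    obtain ⟨ol, og⟩ := ih _ il (fun a' ha' => has a' (by simp [ha']))
    refine ⟨by simp only [List.foldl_cons]; exact ol, ?_⟩
    simp only [List.foldl_cons]
    rw [og, ig]
    simp [Bool.or_assoc]

-- the sieve's entry at c decides BadC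
lemma bad_getD_iff (nums : List Int) (c : Nat) :
    (PySem.List.pyGetD
      ((PySem.List.pyRange 0 (nums.length : Int) 1).foldl
        (fun arr a =>
          (PySem.List.pyRange (a + 1) (nums.length : Int) 1).foldl
            (fun arr b =>
              if PySem.Int.mod (a + b) 2 = 1 ∧ PySem.List.pyGetD nums a 0 ≠ PySem.List.pyGetD nums b 0 then
                PySem.List.pySetD arr (PySem.Int.floordiv (a + b + 1) 2) true
              else arr) arr)
        (List.replicate nums.length false)) (c : Int) false = true)
    ↔ BadC nums c := by
  have has : ∀ a ∈ PySem.List.pyRange 0 (nums.length : Int) 1, (0:Int) ≤ a := by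
    intro a ha; rw [PySem.List.mem_pyRange_one] at ha; exact ha.1
  obtain ⟨_, og⟩ := outer_getD nums c (PySem.List.pyRange 0 (nums.length : Int) 1)
    (List.replicate nums.length false) (by simp) has
  rw [og]
  have hrep : PySem.List.pyGetD (List.replicate nums.length false) (c : Int) false = false := by
    rw [PySem.List.pyGetD_natCast]
    simp [List.getD]
  rw [hrep, Bool.false_or, List.any_eq_true]
  constructor
  · rintro ⟨a, ha, hinner⟩
    rw [List.any_eq_true] at hinner
    obtain ⟨b, hb, hcond⟩ := hinner
    rw [PySem.List.mem_pyRange_one] at ha hb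
    rw [decide_eq_true_iff] at hcond
    obtain ⟨hmod, hne, hdiv⟩ := hcond
    have ha0 : 0 ≤ a := ha.1
    have hb0 : 0 ≤ b := by omega
    refine ⟨a.toNat, b.toNat, by omega, by omega, ?_, ?_, ?_⟩
    · rw [PySem.Int.mod_eq_emod_of_pos (by norm_num)] at hmod; omega
    · intro he
      apply hne
      rw [show a = ((a.toNat : Nat) : Int) by omega, show b = ((b.toNat : Nat) : Int) by omega,
          PySem.List.pyGetD_natCast, PySem.List.pyGetD_natCast]
      exact he
    · rw [PySem.Int.floordiv_eq_ediv_of_pos (by norm_num)] at hdiv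
      omega
  · rintro ⟨A, B, hAB, hBn, hmod, hne, hdiv⟩
    refine ⟨(A : Int), by rw [PySem.List.mem_pyRange_one]; constructor <;> omega, ?_⟩
    rw [List.any_eq_true]
    refine ⟨(B : Int), by rw [PySem.List.mem_pyRange_one]; constructor <;> omega, ?_⟩
    rw [decide_eq_true_iff]
    refine ⟨by rw [PySem.Int.mod_eq_emod_of_pos (by norm_num)]; omega, ?_,
      by rw [PySem.Int.floordiv_eq_ediv_of_pos (by norm_num)]; omega⟩
    rw [PySem.List.pyGetD_natCast, PySem.List.pyGetD_natCast]
    exact hne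

-- for a genuine split index, BadC is exactly the failure of MirrorAt
lemma badC_iff_not_mirror (nums : List Int) (c : Nat) (hc1 : 1 ≤ c) (_hc2 : c < nums.length) :
    BadC nums c ↔ ¬ MirrorAt nums c := by
  constructor
  · rintro ⟨A, B, hAB, hBn, hmod, hne, hdiv⟩ hm
    have hsum : A + B = 2 * c - 1 := by omega
    have hA : A = c - 1 - (B - c) := by omega
    have hB : B = c + (B - c) := by omega
    have := hm (B - c) (by omega) (by omega)
    rw [← hA, ← hB] at this
    exact hne this
  · intro hm
    unfold MirrorAt at hm
    simp only [not_forall] at hm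
    obtain ⟨i, hi, hlt, hne⟩ := hm
    exact ⟨c - 1 - i, c + i, by omega, by omega, by omega, hne, by omega⟩

-- a Bool is the negation of another as soon as the corresponding Props are opposite
lemma bool_eq_not (x y : Bool) (h : x = true ↔ ¬ (y = true)) : x = !y := by
  cases x <;> cases y <;> simp_all

-- the two find? predicates agree on range(1, n)
lemma find_congr_pred {α : Type} (l : List α) (p q : α → Bool)
    (h : ∀ x ∈ l, p x = q x) : l.find? p = l.find? q := by
  induction l with
  | nil => rfl
  | cons x xs ih =>
    rw [List.find?_cons, List.find?_cons, h x (by simp)]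
    cases q x
    · exact ih (fun y hy => h y (by simp [hy]))
    · rfl

-- ===== VERDICT (by name: the statement is the Claim_ definition above) =====
theorem findSplitx_spec : Claim_equal_findSplitx := by
  unfold Claim_equal_findSplitx Spec_findSplitx
  intro nums _
  rw [A_eq_find]
  unfold findSplitx_alt
  apply find_congr_pred
  intro c hc
  rw [PySem.List.mem_pyRange_one] at hc
  have hc1 : 1 ≤ c := hc.1
  have hcn : c < (nums.length : Int) := hc.2
  have hcnat : c = ((c.toNat : Nat) : Int) := by omega
  rw [hcnat]
  have hbiff := bad_getD_iff nums c.toNat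
  have hmiff := badC_iff_not_mirror nums c.toNat (by omega) (by omega)
  apply bool_eq_not
  rw [decide_eq_true_iff]
  constructor
  · intro hm hbad
    exact (hmiff.mp (hbiff.mp hbad)) hm
  · intro hnb
    by_contra hm
    exact hnb (hbiff.mpr (hmiff.mpr hm))
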